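-- pv_equiv track=rewrite | github.com/Richard-YH/YAC | exeorganiser.py | aggregate_windowed_response_questions
-- ===== SOURCE A (Python) =====
-- from typing import Dict, Iterator, List, Sequence, Tuple
--
-- DASS21_RESPONSE_TYPE_VALUE = "response"
--
-- CAPE_BEGIN_MARKER = "BEGIN"
--
-- CAPE_END_MARKER = "END"
--
-- def iter_window_events(
--     rows: Sequence[Dict[str, str]],
--     key_column: str,
--     response_column: str,
-- ) -> Iterator[Tuple[int, str, str, Dict[str, str], str]]:
--     started_participants: set[str] = set()
--     finished_participants: set[str] = set()
--
--     for row_number, row in enumerate(rows, start=2):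
--         participant_value = (row.get(key_column) or "").strip()
--         if not participant_value or participant_value in finished_participants:
--             continue
--
--         response_value_text = (row.get(response_column) or "").strip()
--         response_marker = normalize_marker_token(response_value_text)
--
--         if participant_value not in started_participants:
--             if response_marker != CAPE_BEGIN_MARKER:
--                 continue
--             started_participants.add(participant_value)
--             yield row_number, "begin", participant_value, row, response_value_text
--             continue
--
--         if response_marker == CAPE_END_MARKER:
--             finished_participants.add(participant_value)
--             yield row_number, "end", participant_value, row, response_value_text
--             continue
--
--         if response_marker == CAPE_BEGIN_MARKER:
--             # Ignore repeated BEGIN markers before END.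
--             continue
--
--         yield row_number, "row", participant_value, row, response_value_text
--
-- def normalize_marker_token(value: str) -> str:
--     return value.strip().strip('"').strip("'").upper()
--
-- def aggregate_windowed_response_questions(
--     rows: Sequence[Dict[str, str]],
--     key_column: str,
--     response_column: str,
--     response_type_column: str,
--     question_column: str,
-- ) -> Tuple[List[str], Dict[str, Dict[str, str]]]:
--     participant_response_rows: Dict[str, List[Dict[str, str]]] = {}
--     first_participant_key: str | None = None
--     for _, event, participant_value, row, _ in iter_window_events(
--         rows,
--         key_column,
--         response_column,
--     ):
--         if event == "begin":
--             participant_response_rows[participant_value] = []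
--             if first_participant_key is None:
--                 first_participant_key = participant_value
--             continue
--         if event != "row":
--             continue
--
--         response_type_value = (row.get(response_type_column) or "").strip().lower()
--         if response_type_value != DASS21_RESPONSE_TYPE_VALUE:
--             continue
--
--         participant_response_rows.setdefault(participant_value, []).append(row)
--
--     merge_columns: List[str] = []
--     selected_questions: set[str] = set()
--     if first_participant_key is not None:
--         for row in participant_response_rows.get(first_participant_key, []):
--             question_value = (row.get(question_column) or "").strip()
--             if not question_value or question_value in selected_questions:
--                 continue
--             selected_questions.add(question_value)
--             merge_columns.append(question_value)
--
--     participant_map: Dict[str, Dict[str, str]] = {}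
--     for participant, response_rows in participant_response_rows.items():
--         question_to_response: Dict[str, str] = {}
--         for row in response_rows:
--             question_value = (row.get(question_column) or "").strip()
--             if question_value not in selected_questions or question_value == "":
--                 continue
--             question_to_response[question_value] = row.get(response_column, "")
--
--         participant_map[participant] = {
--             question: question_to_response.get(question, "")
--             for question in merge_columns
--         }
--
--     return merge_columns, participant_map
-- ===== SOURCE B (Python) =====
-- from typing import Dict, List, Sequence, Tuple
--
-- DASS21_RESPONSE_TYPE_VALUE = "response"
-- CAPE_BEGIN_MARKER = "BEGIN"
-- CAPE_END_MARKER = "END"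
--
--
-- def aggregate_windowed_response_questions(
--     rows: Sequence[Dict[str, str]],
--     key_column: str,
--     response_column: str,
--     response_type_column: str,
--     question_column: str,
-- ) -> Tuple[List[str], Dict[str, Dict[str, str]]]:
--     # Single direct loop over the rows (no generator, no stored row lists):
--     # per participant an ordered question -> response dict, last write wins;
--     # the dict's own keys double as the "started participants" set.
--     data: Dict[str, Dict[str, str]] = {}
--     finished: set[str] = set()
--     first: str | None = None
--     for row in rows:
--         participant = (row.get(key_column) or "").strip()
--         if not participant or participant in finished:
--             continue
--         marker = (row.get(response_column) or "").strip().strip('"').strip("'").upper()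
--         if participant not in data:
--             if marker == CAPE_BEGIN_MARKER:
--                 data[participant] = {}
--                 if first is None:
--                     first = participant
--             continue
--         if marker == CAPE_END_MARKER:
--             finished.add(participant)
--             continue
--         if marker == CAPE_BEGIN_MARKER:
--             continue
--         if (row.get(response_type_column) or "").strip().lower() != DASS21_RESPONSE_TYPE_VALUE:
--             continue
--         question = (row.get(question_column) or "").strip()
--         if not question:
--             continue
--         data[participant][question] = row.get(response_column, "")
--
--     merge_columns: List[str] = list(data[first]) if first is not None else []
--     participant_map: Dict[str, Dict[str, str]] = {
--         p: {q: m.get(q, "") for q in merge_columns} for p, m in data.items()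
--     }
--     return merge_columns, participant_map
-- ===== Notes on version B (the rewrite author's own statement) =====
-- stated objective: simpler
-- what changed: B drops the iter_window_events generator and A's three staged passes entirely: one direct loop over the rows inlines the begin/end window logic (the per-participant dict's own keys serve as the started-set) and accumulates an ordered question->response dict per participant (last write wins), followed by a single projection onto the first participant's keys.
import Mathlib
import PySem

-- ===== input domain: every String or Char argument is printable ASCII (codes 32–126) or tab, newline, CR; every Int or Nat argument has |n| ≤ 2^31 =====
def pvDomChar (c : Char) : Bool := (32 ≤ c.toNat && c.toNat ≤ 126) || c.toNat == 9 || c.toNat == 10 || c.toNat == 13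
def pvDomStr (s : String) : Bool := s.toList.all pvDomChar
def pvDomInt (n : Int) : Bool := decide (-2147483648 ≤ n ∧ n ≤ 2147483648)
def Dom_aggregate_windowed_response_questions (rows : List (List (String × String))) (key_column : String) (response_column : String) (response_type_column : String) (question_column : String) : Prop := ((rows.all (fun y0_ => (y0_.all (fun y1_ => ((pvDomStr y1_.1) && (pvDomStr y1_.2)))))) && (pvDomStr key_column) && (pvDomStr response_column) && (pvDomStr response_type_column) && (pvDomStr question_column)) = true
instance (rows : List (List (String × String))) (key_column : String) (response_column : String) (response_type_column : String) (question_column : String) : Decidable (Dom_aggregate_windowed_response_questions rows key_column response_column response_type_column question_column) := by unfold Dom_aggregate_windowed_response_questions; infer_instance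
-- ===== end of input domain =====

-- B replaces A's generator + three staged passes (store per-participant row lists, rescan the
-- first participant's list for the columns, rescan every list into maps) by ONE direct loop
-- over the rows accumulating per-participant ordered question→response dicts (the dict's keys
-- double as the started-set) plus a final projection (objective: simpler).

-- ===== PORT A =====

-- row.get(k): Python dict lookup, first match on the association list
def pvRowGet (row : List (String × String)) (k : String) : Option String :=
  (PySem.Dict.mk row).get? k

-- normalize_marker_token: value.strip().strip('"').strip("'").upper()
def pvNormalizeMarker (s : String) : String :=
  PySem.Str.upper (PySem.Str.stripChars (PySem.Str.stripChars (PySem.Str.strip s) "\"") "'")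

-- one step of the generator iter_window_events; state = (started, finished, yielded events)
def genStep (key_column response_column : String)
    (st : PySem.Set String × PySem.Set String ×
          List (Int × String × String × List (String × String) × String))
    (ie : Int × List (String × String)) :
    PySem.Set String × PySem.Set String ×
      List (Int × String × String × List (String × String) × String) :=
  let row_number := ie.1
  let row := ie.2
  let participant := PySem.Str.strip ((pvRowGet row key_column).getD "")
  if participant = "" ∨ PySem.Set.contains st.2.1 participant = true then st
  else
    let rvt := PySem.Str.strip ((pvRowGet row response_column).getD "")
    let marker := pvNormalizeMarker rvt
    if ¬ PySem.Set.contains st.1 participant = true then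
      if marker ≠ "BEGIN" then st
      else (PySem.Set.add st.1 participant, st.2.1,
            st.2.2 ++ [(row_number, "begin", participant, row, rvt)])
    else if marker = "END" then
      (st.1, PySem.Set.add st.2.1 participant,
       st.2.2 ++ [(row_number, "end", participant, row, rvt)])
    else if marker = "BEGIN" then st
    else (st.1, st.2.1, st.2.2 ++ [(row_number, "row", participant, row, rvt)])

-- the generator, materialised as the list of yielded events
def iterWindowEvents (rows : List (List (String × String))) (key_column response_column : String) :
    List (Int × String × String × List (String × String) × String) :=
  ((PySem.List.enumerate rows 2).foldl (genStep key_column response_column)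
    (PySem.Set.empty, PySem.Set.empty, [])).2.2

-- body of A's event loop: builds participant -> list of response rows, and the first participant
def aEvStep (response_type_column : String)
    (st : PySem.Dict String (List (List (String × String))) × Option String)
    (ev : Int × String × String × List (String × String) × String) :
    PySem.Dict String (List (List (String × String))) × Option String :=
  if ev.2.1 = "begin" then
    (st.1.insert ev.2.2.1 [], if st.2 = none then some ev.2.2.1 else st.2)
  else if ev.2.1 ≠ "row" then st
  else if PySem.Str.lower (PySem.Str.strip ((pvRowGet ev.2.2.2.1 response_type_column).getD "")) ≠ "response"
  then st
  else -- participant_response_rows.setdefault(p, []).append(row)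
    (st.1.insert ev.2.2.1 ((st.1.get? ev.2.2.1).getD [] ++ [ev.2.2.2.1]), st.2)

-- body of A's merge_columns loop (state: merge_columns, selected_questions)
def aMergeStep (question_column : String)
    (ms : List String × PySem.Set String) (row : List (String × String)) :
    List String × PySem.Set String :=
  let q := PySem.Str.strip ((pvRowGet row question_column).getD "")
  if q = "" ∨ PySem.Set.contains ms.2 q = true then ms
  else (ms.1 ++ [q], PySem.Set.add ms.2 q)

-- body of A's question_to_response loop (selected_questions is fixed for the whole loop)
def aFiltStep (response_column question_column : String) (sel : PySem.Set String)
    (d : PySem.Dict String String) (row : List (String × String)) : PySem.Dict String String :=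
  let q := PySem.Str.strip ((pvRowGet row question_column).getD "")
  if ¬ PySem.Set.contains sel q = true ∨ q = "" then d
  else d.insert q ((pvRowGet row response_column).getD "")

-- A's code after the event loop: merge_columns, then participant_map
def aPost (response_column question_column : String)
    (st : PySem.Dict String (List (List (String × String))) × Option String) :
    List String × List (String × List (String × String)) :=
  let ms := match st.2 with
    | none => (([] : List String), (PySem.Set.empty : PySem.Set String))
    | some f => ((st.1.get? f).getD []).foldl (aMergeStep question_column)
        ([], PySem.Set.empty)
  let pm := st.1.items.foldl
    (fun (m : PySem.Dict String (List (String × String))) pr =>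
      let qtr := pr.2.foldl (aFiltStep response_column question_column ms.2) (PySem.Dict.mk [])
      m.insert pr.1
        ((ms.1.foldl (fun (d : PySem.Dict String String) q => d.insert q (qtr.getD q ""))
          (PySem.Dict.mk [])).items))
    (PySem.Dict.mk [])
  (ms.1, pm.items)

def aggregate_windowed_response_questions (rows : List (List (String × String))) (key_column : String) (response_column : String) (response_type_column : String) (question_column : String) : List String × (List (String × List (String × String))) :=
  aPost response_column question_column
    ((iterWindowEvents rows key_column response_column).foldl
      (aEvStep response_type_column) (PySem.Dict.mk [], none))

-- ===== PORT B =====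

-- B's single loop body; state = (data : participant -> ordered question->response dict,
-- finished, first).  'data[participant][question] = …' is ported with Dict.modify, exact
-- here because the branch is only reached when 'participant' is a key of data.
def bStep (key_column response_column response_type_column question_column : String)
    (st : PySem.Dict String (PySem.Dict String String) × PySem.Set String × Option String)
    (row : List (String × String)) :
    PySem.Dict String (PySem.Dict String String) × PySem.Set String × Option String :=
  let participant := PySem.Str.strip ((pvRowGet row key_column).getD "")
  if participant = "" ∨ PySem.Set.contains st.2.1 participant = true then st
  else
    let marker := PySem.Str.upper (PySem.Str.stripChars (PySem.Str.stripChars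
      (PySem.Str.strip ((pvRowGet row response_column).getD "")) "\"") "'")
    if st.1.contains participant = false then
      if marker = "BEGIN" then
        (st.1.insert participant (PySem.Dict.mk []), st.2.1,
         if st.2.2 = none then some participant else st.2.2)
      else st
    else if marker = "END" then (st.1, PySem.Set.add st.2.1 participant, st.2.2)
    else if marker = "BEGIN" then st
    else if PySem.Str.lower (PySem.Str.strip ((pvRowGet row response_type_column).getD "")) ≠ "response"
    then st
    else
      let question := PySem.Str.strip ((pvRowGet row question_column).getD "")
      if question = "" then st
      else (st.1.modify participant (PySem.Dict.mk [])
              (fun m => m.insert question ((pvRowGet row response_column).getD "")),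
            st.2.1, st.2.2)

-- B's code after the loop: merge_columns = the first participant's keys, then the projection
def bPost (st : PySem.Dict String (PySem.Dict String String) × PySem.Set String × Option String) :
    List String × List (String × List (String × String)) :=
  let merge := match st.2.2 with
    | none => ([] : List String)
    | some f => ((st.1.get? f).getD (PySem.Dict.mk [])).keys
  let pm := st.1.items.foldl
    (fun (m : PySem.Dict String (List (String × String))) pr =>
      m.insert pr.1
        ((merge.foldl (fun (d : PySem.Dict String String) q => d.insert q (pr.2.getD q ""))
          (PySem.Dict.mk [])).items))
    (PySem.Dict.mk [])
  (merge, pm.items)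

def aggregate_windowed_response_questions_alt (rows : List (List (String × String))) (key_column : String) (response_column : String) (response_type_column : String) (question_column : String) : List String × (List (String × List (String × String))) :=
  bPost (rows.foldl (bStep key_column response_column response_type_column question_column)
    (PySem.Dict.mk [], PySem.Set.empty, none))

-- ===== PRECONDITION & SPEC =====
def Spec_aggregate_windowed_response_questions (rows : List (List (String × String))) (key_column : String) (response_column : String) (response_type_column : String) (question_column : String) (out : List String × (List (String × List (String × String)))) : Prop := out = aggregate_windowed_response_questions_alt rows key_column response_column response_type_column question_column
instance (rows : List (List (String × String))) (key_column : String) (response_column : String) (response_type_column : String) (question_column : String) (out : List String × (List (String × List (String × String)))) : Decidable (Spec_aggregate_windowed_response_questions rows key_column response_column response_type_column question_column out) := by unfold Spec_aggregate_windowed_response_questions; infer_instance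

-- ===== CLAIM (what is proved, stated in full; the proofs are below) =====
def Claim_equal_aggregate_windowed_response_questions : Prop := ∀ (rows : List (List (String × String))) (key_column : String) (response_column : String) (response_type_column : String) (question_column : String), Dom_aggregate_windowed_response_questions rows key_column response_column response_type_column question_column → Spec_aggregate_windowed_response_questions rows key_column response_column response_type_column question_column (aggregate_windowed_response_questions rows key_column response_column response_type_column question_column)

-- ===== LEMMAS AND PROOFS =====

-- head of a dropWhile fails the predicate
theorem pvHead_dropWhile (p : Char → Bool) :
    ∀ (l : List Char) (x : Char) (xs : List Char),
    List.dropWhile p l = x :: xs → p x = false := by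
  intro l
  induction l with
  | nil => intro x xs h; simp at h
  | cons y ys ih =>
      intro x xs h
      rw [List.dropWhile_cons] at h
      by_cases hy : p y
      · rw [if_pos hy] at h; exact ih x xs h
      · rw [if_neg hy] at h
        cases h; simpa using hy

-- strip is idempotent (A normalises the already-stripped text, B normalises in one go)
theorem pvStrip_idem (cs : List Char) :
    PySem.Chars.strip (PySem.Chars.strip cs) = PySem.Chars.strip cs := by
  have hdef : ∀ l, PySem.Chars.strip l =
      ((l.dropWhile (fun c => PySem.Chars.isspace c)).reverse.dropWhile
        (fun c => PySem.Chars.isspace c)).reverse := by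
    intro l; simp [PySem.Chars.strip, PySem.Chars.rstrip, PySem.Chars.lstrip]
  rw [hdef cs, hdef]
  generalize ha : cs.dropWhile (fun c => PySem.Chars.isspace c) = a at *
  generalize hb : a.reverse.dropWhile (fun c => PySem.Chars.isspace c) = b at *
  have h1 : b.reverse.dropWhile (fun c => PySem.Chars.isspace c) = b.reverse := by
    cases hbe : b.reverse with
    | nil => simp
    | cons x xs =>
        have hpref : b.reverse <+: a := by
          have hsuf : b <:+ a.reverse := hb ▸ List.dropWhile_suffix _
          simpa using hsuf.reverse
        rcases hpref with ⟨t, ht⟩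
        rw [hbe] at ht
        have hpx : (fun c => PySem.Chars.isspace c) x = false := by
          apply pvHead_dropWhile _ cs x (xs ++ t)
          rw [ha, ← ht]; simp
        simp [hpx]
  rw [h1, List.reverse_reverse, ← hb, List.dropWhile_idempotent]

theorem pvMarker_eq (s : String) :
    pvNormalizeMarker (PySem.Str.strip s) =
      PySem.Str.upper (PySem.Str.stripChars (PySem.Str.stripChars (PySem.Str.strip s) "\"") "'") := by
  unfold pvNormalizeMarker
  have : PySem.Str.strip (PySem.Str.strip s) = PySem.Str.strip s := by
    simp [PySem.Str.strip, pvStrip_idem]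
  rw [this]

-- d.modify is an insert of the modified value
theorem pvModify_eq_insert (d : PySem.Dict String (PySem.Dict String String)) (k : String)
    (f : PySem.Dict String String → PySem.Dict String String) :
    d.modify k (PySem.Dict.mk []) f = d.insert k (f (d.getD k (PySem.Dict.mk []))) := by
  simp [PySem.Dict.modify, PySem.Dict.insert, PySem.Dict.getD]

-- inserting the value already present at a key is the identity (keys unique)
theorem pvInsert_self (d : PySem.Dict String (PySem.Dict String String)) (k : String)
    (v : PySem.Dict String String) (hnd : d.keys.Nodup) (h : d.get? k = some v) :
    d.insert k v = d := by
  have hc : d.contains k = true := by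
    by_contra hx
    rw [(PySem.Dict.get?_eq_none_iff_contains d k).mpr (by simpa using hx)] at h
    simp at h
  apply PySem.Dict.ext
  rw [PySem.Dict.items_insert, if_pos hc]
  conv_rhs => rw [← List.map_id d.items]
  apply List.map_congr_left
  intro p hp
  simp only [id_eq]
  by_cases hpk : (p.1 == k) = true
  · have hk : p.1 = k := by simpa using hpk
    have hv : d.get? p.1 = some p.2 :=
      PySem.Dict.get?_of_mem_items d (by simpa using hp) hnd
    rw [hk, h] at hv
    rw [if_pos hpk, ← hk, Option.some.inj hv]
  · rw [if_neg (by simpa using hpk)]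

-- the question->last-response map that B maintains incrementally, computed from a row list
def pvQStep (response_column question_column : String)
    (d : PySem.Dict String String) (row : List (String × String)) : PySem.Dict String String :=
  let q := PySem.Str.strip ((pvRowGet row question_column).getD "")
  if q = "" then d else d.insert q ((pvRowGet row response_column).getD "")

def pvQOf (response_column question_column : String) (rs : List (List (String × String))) :
    PySem.Dict String String :=
  rs.foldl (pvQStep response_column question_column) (PySem.Dict.mk [])

-- A's row-list dict, with every value replaced by its question map
def pvMapQ (response_column question_column : String)
    (prr : PySem.Dict String (List (List (String × String)))) :
    PySem.Dict String (PySem.Dict String String) :=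
  PySem.Dict.mk (prr.items.map (fun pr => (pr.1, pvQOf response_column question_column pr.2)))

theorem contains_pvMapQ (resp qc k : String) (prr : PySem.Dict String (List (List (String × String)))) :
    (pvMapQ resp qc prr).contains k = prr.contains k := by
  obtain ⟨items⟩ := prr
  simp [pvMapQ, PySem.Dict.contains_mk, List.any_map, Function.comp_def]

theorem get?_pvMapQ (resp qc k : String) (prr : PySem.Dict String (List (String × String) |> List)) :
    (pvMapQ resp qc prr).get? k = (prr.get? k).map (pvQOf resp qc) := by
  obtain ⟨items⟩ := prr
  induction items with
  | nil => rfl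
  | cons p rest ih =>
      obtain ⟨pk, pv⟩ := p
      simp only [pvMapQ, List.map_cons, PySem.Dict.get?_mk_cons]
      by_cases h : pk == k
      · simp only [h, ite_true, Option.map_some]
      · simp only [h, Bool.false_eq_true, ite_false]
        exact ih

theorem pvMapQ_insert (resp qc p : String) (rs : List (List (String × String)))
    (prr : PySem.Dict String (List (List (String × String)))) :
    pvMapQ resp qc (prr.insert p rs) = (pvMapQ resp qc prr).insert p (pvQOf resp qc rs) := by
  apply PySem.Dict.ext
  rw [PySem.Dict.items_insert]
  rw [contains_pvMapQ]
  by_cases h : prr.contains p = true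
  · simp only [h, if_true]
    simp only [pvMapQ, PySem.Dict.items_insert, h, if_true, List.map_map]
    apply List.map_congr_left
    intro pr _
    by_cases hp : pr.1 == p
    · simp [Function.comp, hp]
    · simp [Function.comp, hp]
  · simp only [h, if_false, Bool.false_eq_true]
    simp only [pvMapQ, PySem.Dict.items_insert, h, if_false, Bool.false_eq_true, List.map_append]
    rfl

-- unfolding lemmas for the two loop bodies (pure definitional reduction)
theorem genStep_eq (kc rc : String) (s f : PySem.Set String)
    (evs : List (Int × String × String × List (String × String) × String))
    (n : Int) (row : List (String × String)) :
    genStep kc rc (s, f, evs) (n, row) =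
      (if (PySem.Str.strip ((pvRowGet row kc).getD "")) = "" ∨ PySem.Set.contains f (PySem.Str.strip ((pvRowGet row kc).getD "")) = true then (s, f, evs)
       else if ¬ PySem.Set.contains s (PySem.Str.strip ((pvRowGet row kc).getD "")) = true then
         if pvNormalizeMarker (PySem.Str.strip ((pvRowGet row rc).getD "")) ≠ "BEGIN" then (s, f, evs)
         else (PySem.Set.add s (PySem.Str.strip ((pvRowGet row kc).getD "")), f, evs ++ [(n, "begin", (PySem.Str.strip ((pvRowGet row kc).getD "")), row, (PySem.Str.strip ((pvRowGet row rc).getD "")))])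
       else if pvNormalizeMarker (PySem.Str.strip ((pvRowGet row rc).getD "")) = "END" then
         (s, PySem.Set.add f (PySem.Str.strip ((pvRowGet row kc).getD "")), evs ++ [(n, "end", (PySem.Str.strip ((pvRowGet row kc).getD "")), row, (PySem.Str.strip ((pvRowGet row rc).getD "")))])
       else if pvNormalizeMarker (PySem.Str.strip ((pvRowGet row rc).getD "")) = "BEGIN" then (s, f, evs)
       else (s, f, evs ++ [(n, "row", (PySem.Str.strip ((pvRowGet row kc).getD "")), row, (PySem.Str.strip ((pvRowGet row rc).getD "")))])) := rfl

theorem bStep_eq (kc rc rtc qc : String)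
    (data : PySem.Dict String (PySem.Dict String String)) (fin : PySem.Set String)
    (fst : Option String) (row : List (String × String)) :
    bStep kc rc rtc qc (data, fin, fst) row =
      (if (PySem.Str.strip ((pvRowGet row kc).getD "")) = "" ∨ PySem.Set.contains fin (PySem.Str.strip ((pvRowGet row kc).getD "")) = true then (data, fin, fst)
       else if data.contains (PySem.Str.strip ((pvRowGet row kc).getD "")) = false then
         if PySem.Str.upper (PySem.Str.stripChars (PySem.Str.stripChars (PySem.Str.strip ((pvRowGet row rc).getD "")) "\"") "'") = "BEGIN" then
           (data.insert (PySem.Str.strip ((pvRowGet row kc).getD "")) (PySem.Dict.mk []), fin, if fst = none then some (PySem.Str.strip ((pvRowGet row kc).getD "")) else fst)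
         else (data, fin, fst)
       else if PySem.Str.upper (PySem.Str.stripChars (PySem.Str.stripChars (PySem.Str.strip ((pvRowGet row rc).getD "")) "\"") "'") = "END" then
         (data, PySem.Set.add fin (PySem.Str.strip ((pvRowGet row kc).getD "")), fst)
       else if PySem.Str.upper (PySem.Str.stripChars (PySem.Str.stripChars (PySem.Str.strip ((pvRowGet row rc).getD "")) "\"") "'") = "BEGIN" then
         (data, fin, fst)
       else if PySem.Str.lower (PySem.Str.strip ((pvRowGet row rtc).getD "")) ≠ "response" then
         (data, fin, fst)
       else if PySem.Str.strip ((pvRowGet row qc).getD "") = "" then (data, fin, fst)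
       else (data.modify (PySem.Str.strip ((pvRowGet row kc).getD "")) (PySem.Dict.mk [])
               (fun m => m.insert (PySem.Str.strip ((pvRowGet row qc).getD ""))
                 ((pvRowGet row rc).getD "")), fin, fst)) := rfl

theorem keys_pvMapQ (resp qc : String) (prr : PySem.Dict String (List (List (String × String)))) :
    (pvMapQ resp qc prr).keys = prr.keys := by
  obtain ⟨items⟩ := prr
  simp [pvMapQ, PySem.Dict.keys, List.map_map, Function.comp_def]

-- each generator step only appends to the event list
theorem genStep_append (kc rc : String)
    (st : PySem.Set String × PySem.Set String ×
          List (Int × String × String × List (String × String) × String))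
    (ie : Int × List (String × String)) :
    genStep kc rc st ie =
      ((genStep kc rc (st.1, st.2.1, []) ie).1,
       (genStep kc rc (st.1, st.2.1, []) ie).2.1,
       st.2.2 ++ (genStep kc rc (st.1, st.2.1, []) ie).2.2) := by
  obtain ⟨s, f, evs⟩ := st
  obtain ⟨n, row⟩ := ie
  rw [genStep_eq, genStep_eq]
  split_ifs <;> simp

theorem genFold_append (kc rc : String)
    (l : List (Int × List (String × String))) :
    ∀ (s f : PySem.Set String)
      (evs : List (Int × String × String × List (String × String) × String)),
    l.foldl (genStep kc rc) (s, f, evs) =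
      ((l.foldl (genStep kc rc) (s, f, [])).1,
       (l.foldl (genStep kc rc) (s, f, [])).2.1,
       evs ++ (l.foldl (genStep kc rc) (s, f, [])).2.2) := by
  induction l with
  | nil => intro s f evs; simp
  | cons ie rest ih =>
      intro s f evs
      simp only [List.foldl_cons]
      rw [genStep_append kc rc (s, f, evs) ie]
      rw [ih (genStep kc rc (s, f, []) ie).1 (genStep kc rc (s, f, []) ie).2.1
            (evs ++ (genStep kc rc (s, f, []) ie).2.2),
          ih (genStep kc rc (s, f, []) ie).1 (genStep kc rc (s, f, []) ie).2.1
            (genStep kc rc (s, f, []) ie).2.2]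
      simp

-- THE FUSION LEMMA: B's single loop simulates the generator composed with A's event loop
theorem pvFuse (kc rc rtc qc : String) :
    ∀ (rows : List (List (String × String))) (n : Int)
      (started finished : PySem.Set String)
      (prr : PySem.Dict String (List (List (String × String)))) (fst : Option String),
    prr.keys.Nodup →
    (∀ p, PySem.Set.contains started p = prr.contains p) →
    rows.foldl (bStep kc rc rtc qc) (pvMapQ rc qc prr, finished, fst) =
      (pvMapQ rc qc
        ((((PySem.List.enumerate rows n).foldl (genStep kc rc)
            (started, finished, [])).2.2.foldl (aEvStep rtc) (prr, fst)).1),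
       ((PySem.List.enumerate rows n).foldl (genStep kc rc) (started, finished, [])).2.1,
       (((PySem.List.enumerate rows n).foldl (genStep kc rc)
            (started, finished, [])).2.2.foldl (aEvStep rtc) (prr, fst)).2) := by
  intro rows
  induction rows with
  | nil => intro n started finished prr fst _ _; simp [PySem.List.enumerate_nil]
  | cons row rest ih =>
      intro n started finished prr fst hnd hinv
      rw [PySem.List.enumerate_cons]
      simp only [List.foldl_cons]
      rw [genFold_append kc rc _ (genStep kc rc (started, finished, []) (n, row)).1
            (genStep kc rc (started, finished, []) (n, row)).2.1
            (genStep kc rc (started, finished, []) (n, row)).2.2]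
      have hmB : PySem.Str.upper (PySem.Str.stripChars (PySem.Str.stripChars (PySem.Str.strip ((pvRowGet row rc).getD "")) "\"") "'") =
          pvNormalizeMarker (PySem.Str.strip ((pvRowGet row rc).getD "")) := (pvMarker_eq ((pvRowGet row rc).getD "")).symm
      by_cases h0 : (PySem.Str.strip ((pvRowGet row kc).getD "")) = "" ∨ PySem.Set.contains finished (PySem.Str.strip ((pvRowGet row kc).getD "")) = true
      · have hg : genStep kc rc (started, finished, []) (n, row) = (started, finished, []) := by
          rw [genStep_eq, if_pos h0]
        have hbs : bStep kc rc rtc qc (pvMapQ rc qc prr, finished, fst) row =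
            (pvMapQ rc qc prr, finished, fst) := by
          rw [bStep_eq, if_pos h0]
        rw [hg, hbs]
        simpa using ih n.succ started finished prr fst hnd hinv
      · by_cases hs : PySem.Set.contains started (PySem.Str.strip ((pvRowGet row kc).getD "")) = true
        · have hdc : (pvMapQ rc qc prr).contains (PySem.Str.strip ((pvRowGet row kc).getD "")) = true := by
            rw [contains_pvMapQ, ← hinv]; exact hs
          by_cases hend : pvNormalizeMarker (PySem.Str.strip ((pvRowGet row rc).getD "")) = "END"
          · have hg : genStep kc rc (started, finished, []) (n, row) =
                (started, PySem.Set.add finished (PySem.Str.strip ((pvRowGet row kc).getD "")), [(n, "end", (PySem.Str.strip ((pvRowGet row kc).getD "")), row, (PySem.Str.strip ((pvRowGet row rc).getD "")))]) := by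
              rw [genStep_eq, if_neg h0, if_neg (not_not_intro hs), if_pos hend]
              rfl
            have hbs : bStep kc rc rtc qc (pvMapQ rc qc prr, finished, fst) row =
                (pvMapQ rc qc prr, PySem.Set.add finished (PySem.Str.strip ((pvRowGet row kc).getD "")), fst) := by
              rw [bStep_eq, if_neg h0, if_neg (by simp [hdc]), if_pos (hmB.trans hend)]
            rw [hg, hbs]
            have hev : aEvStep rtc (prr, fst) (n, "end", (PySem.Str.strip ((pvRowGet row kc).getD "")), row, (PySem.Str.strip ((pvRowGet row rc).getD ""))) = (prr, fst) := by
              unfold aEvStep; simp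
            simp only [List.singleton_append, List.foldl_cons, hev]
            exact ih n.succ started (PySem.Set.add finished (PySem.Str.strip ((pvRowGet row kc).getD ""))) prr fst hnd hinv
          · by_cases hbeg : pvNormalizeMarker (PySem.Str.strip ((pvRowGet row rc).getD "")) = "BEGIN"
            · have hg : genStep kc rc (started, finished, []) (n, row) =
                  (started, finished, []) := by
                rw [genStep_eq, if_neg h0, if_neg (not_not_intro hs), if_neg hend, if_pos hbeg]
              have hbs : bStep kc rc rtc qc (pvMapQ rc qc prr, finished, fst) row =
                  (pvMapQ rc qc prr, finished, fst) := by
                rw [bStep_eq, if_neg h0, if_neg (by simp [hdc]), if_neg (hmB.trans_ne hend),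
                  if_pos (hmB.trans hbeg)]
              rw [hg, hbs]
              simpa using ih n.succ started finished prr fst hnd hinv
            · -- a "row" event
              have hg : genStep kc rc (started, finished, []) (n, row) =
                  (started, finished, [(n, "row", (PySem.Str.strip ((pvRowGet row kc).getD "")), row, (PySem.Str.strip ((pvRowGet row rc).getD "")))]) := by
                rw [genStep_eq, if_neg h0, if_neg (not_not_intro hs), if_neg hend, if_neg hbeg]
                rfl
              rw [hg]
              simp only [List.singleton_append, List.foldl_cons]
              have hinv' : ∀ x, PySem.Set.contains started x =
                  (prr.insert (PySem.Str.strip ((pvRowGet row kc).getD "")) ((prr.get? (PySem.Str.strip ((pvRowGet row kc).getD ""))).getD [] ++ [row])).contains x := by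
                intro x
                rw [hinv x, PySem.Dict.contains_insert]
                by_cases hx : x = (PySem.Str.strip ((pvRowGet row kc).getD ""))
                · subst hx
                  have hcc : prr.contains (PySem.Str.strip ((pvRowGet row kc).getD "")) = true := by
                    rw [← hinv]; exact hs
                  simp [hcc]
                · simp [hx]
              have hnd' : (prr.insert (PySem.Str.strip ((pvRowGet row kc).getD "")) ((prr.get? (PySem.Str.strip ((pvRowGet row kc).getD ""))).getD [] ++ [row])).keys.Nodup :=
                PySem.Dict.nodup_keys_insert _ _ _ hnd
              by_cases hrt : PySem.Str.lower
                  (PySem.Str.strip ((pvRowGet row rtc).getD "")) = "response"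
              · have hev : aEvStep rtc (prr, fst) (n, "row", (PySem.Str.strip ((pvRowGet row kc).getD "")), row, (PySem.Str.strip ((pvRowGet row rc).getD ""))) =
                    (prr.insert (PySem.Str.strip ((pvRowGet row kc).getD "")) ((prr.get? (PySem.Str.strip ((pvRowGet row kc).getD ""))).getD [] ++ [row]), fst) := by
                  unfold aEvStep; simp [hrt]
                rw [hev]
                have hget : (pvMapQ rc qc prr).get? (PySem.Str.strip ((pvRowGet row kc).getD "")) =
                    some (pvQOf rc qc ((prr.get? (PySem.Str.strip ((pvRowGet row kc).getD ""))).getD [])) := by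
                  rw [get?_pvMapQ]
                  rcases hgp : prr.get? (PySem.Str.strip ((pvRowGet row kc).getD "")) with _ | rs
                  · exfalso
                    rw [PySem.Dict.get?_eq_none_iff_contains] at hgp
                    rw [← hinv] at hgp; rw [hs] at hgp; simp at hgp
                  · rfl
                have hnewq : pvQOf rc qc ((prr.get? (PySem.Str.strip ((pvRowGet row kc).getD ""))).getD [] ++ [row]) =
                    pvQStep rc qc (pvQOf rc qc ((prr.get? (PySem.Str.strip ((pvRowGet row kc).getD ""))).getD [])) row := by
                  simp [pvQOf, List.foldl_append]
                by_cases hqe : PySem.Str.strip ((pvRowGet row qc).getD "") = ""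
                · have hbs : bStep kc rc rtc qc (pvMapQ rc qc prr, finished, fst) row =
                      (pvMapQ rc qc prr, finished, fst) := by
                    rw [bStep_eq, if_neg h0, if_neg (by simp [hdc]), if_neg (hmB.trans_ne hend),
                      if_neg (hmB.trans_ne hbeg), if_neg (not_not_intro hrt), if_pos hqe]
                  have hsame : pvMapQ rc qc (prr.insert (PySem.Str.strip ((pvRowGet row kc).getD "")) ((prr.get? (PySem.Str.strip ((pvRowGet row kc).getD ""))).getD [] ++ [row])) =
                      pvMapQ rc qc prr := by
                    rw [pvMapQ_insert, hnewq]
                    rw [show pvQStep rc qc (pvQOf rc qc ((prr.get? (PySem.Str.strip ((pvRowGet row kc).getD ""))).getD [])) row =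
                        pvQOf rc qc ((prr.get? (PySem.Str.strip ((pvRowGet row kc).getD ""))).getD []) from by simp [pvQStep, hqe]]
                    exact pvInsert_self _ _ _ (by rw [keys_pvMapQ]; exact hnd) hget
                  rw [hbs]
                  have hres := ih n.succ started finished
                    (prr.insert (PySem.Str.strip ((pvRowGet row kc).getD "")) ((prr.get? (PySem.Str.strip ((pvRowGet row kc).getD ""))).getD [] ++ [row])) fst hnd' hinv'
                  rw [hsame] at hres
                  exact hres
                · have hbs : bStep kc rc rtc qc (pvMapQ rc qc prr, finished, fst) row =
                      ((pvMapQ rc qc prr).modify (PySem.Str.strip ((pvRowGet row kc).getD "")) (PySem.Dict.mk [])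
                        (fun m => m.insert (PySem.Str.strip ((pvRowGet row qc).getD ""))
                          ((pvRowGet row rc).getD "")), finished, fst) := by
                    rw [bStep_eq, if_neg h0, if_neg (by simp [hdc]), if_neg (hmB.trans_ne hend),
                      if_neg (hmB.trans_ne hbeg), if_neg (not_not_intro hrt), if_neg hqe]
                  have hdata : (pvMapQ rc qc prr).modify (PySem.Str.strip ((pvRowGet row kc).getD "")) (PySem.Dict.mk [])
                      (fun m => m.insert (PySem.Str.strip ((pvRowGet row qc).getD ""))
                        ((pvRowGet row rc).getD "")) =
                      pvMapQ rc qc (prr.insert (PySem.Str.strip ((pvRowGet row kc).getD "")) ((prr.get? (PySem.Str.strip ((pvRowGet row kc).getD ""))).getD [] ++ [row])) := by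
                    rw [pvModify_eq_insert, pvMapQ_insert, hnewq]
                    rw [PySem.Dict.getD_of_get?_eq_some _ _ hget]
                    rw [show pvQStep rc qc (pvQOf rc qc ((prr.get? (PySem.Str.strip ((pvRowGet row kc).getD ""))).getD [])) row =
                        (pvQOf rc qc ((prr.get? (PySem.Str.strip ((pvRowGet row kc).getD ""))).getD [])).insert
                          (PySem.Str.strip ((pvRowGet row qc).getD ""))
                          ((pvRowGet row rc).getD "") from by simp [pvQStep, hqe]]
                  rw [hbs, hdata]
                  exact ih n.succ started finished
                    (prr.insert (PySem.Str.strip ((pvRowGet row kc).getD "")) ((prr.get? (PySem.Str.strip ((pvRowGet row kc).getD ""))).getD [] ++ [row])) fst hnd' hinv'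
              · have hev : aEvStep rtc (prr, fst) (n, "row", (PySem.Str.strip ((pvRowGet row kc).getD "")), row, (PySem.Str.strip ((pvRowGet row rc).getD ""))) = (prr, fst) := by
                  unfold aEvStep; simp [hrt]
                have hbs : bStep kc rc rtc qc (pvMapQ rc qc prr, finished, fst) row =
                    (pvMapQ rc qc prr, finished, fst) := by
                  rw [bStep_eq, if_neg h0, if_neg (by simp [hdc]), if_neg (hmB.trans_ne hend),
                    if_neg (hmB.trans_ne hbeg), if_pos hrt]
                rw [hev, hbs]
                exact ih n.succ started finished prr fst hnd hinv
        · -- participant not yet started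
          have hdc : (pvMapQ rc qc prr).contains (PySem.Str.strip ((pvRowGet row kc).getD "")) = false := by
            rw [contains_pvMapQ, ← hinv]; simpa using hs
          by_cases hbeg : pvNormalizeMarker (PySem.Str.strip ((pvRowGet row rc).getD "")) = "BEGIN"
          · have hg : genStep kc rc (started, finished, []) (n, row) =
                (PySem.Set.add started (PySem.Str.strip ((pvRowGet row kc).getD "")), finished, [(n, "begin", (PySem.Str.strip ((pvRowGet row kc).getD "")), row, (PySem.Str.strip ((pvRowGet row rc).getD "")))]) := by
              rw [genStep_eq, if_neg h0, if_pos hs,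
                if_neg (not_not_intro hbeg)]
              rfl
            have hbs : bStep kc rc rtc qc (pvMapQ rc qc prr, finished, fst) row =
                ((pvMapQ rc qc prr).insert (PySem.Str.strip ((pvRowGet row kc).getD "")) (PySem.Dict.mk []), finished,
                 if fst = none then some (PySem.Str.strip ((pvRowGet row kc).getD "")) else fst) := by
              rw [bStep_eq, if_neg h0, if_pos hdc, if_pos (hmB.trans hbeg)]
            rw [hg, hbs]
            have hev : aEvStep rtc (prr, fst) (n, "begin", (PySem.Str.strip ((pvRowGet row kc).getD "")), row, (PySem.Str.strip ((pvRowGet row rc).getD ""))) =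
                (prr.insert (PySem.Str.strip ((pvRowGet row kc).getD "")) [], if fst = none then some (PySem.Str.strip ((pvRowGet row kc).getD "")) else fst) := by
              unfold aEvStep; simp
            simp only [List.singleton_append, List.foldl_cons, hev]
            have hmq : (pvMapQ rc qc prr).insert (PySem.Str.strip ((pvRowGet row kc).getD "")) (PySem.Dict.mk []) =
                pvMapQ rc qc (prr.insert (PySem.Str.strip ((pvRowGet row kc).getD "")) []) := by
              rw [pvMapQ_insert]; rfl
            have hPs : (PySem.Str.strip ((pvRowGet row kc).getD "")) ∉ started := by
              simpa [PySem.Set.contains] using hs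
            rw [hmq]
            exact ih n.succ (PySem.Set.add started (PySem.Str.strip ((pvRowGet row kc).getD ""))) finished (prr.insert (PySem.Str.strip ((pvRowGet row kc).getD "")) [])
              (if fst = none then some (PySem.Str.strip ((pvRowGet row kc).getD "")) else fst)
              (PySem.Dict.nodup_keys_insert _ _ _ hnd)
              (by intro x
                  rw [PySem.Dict.contains_insert]
                  by_cases hx : x = (PySem.Str.strip ((pvRowGet row kc).getD ""))
                  · subst hx
                    simp [PySem.Set.add, PySem.Set.contains, hPs]
                  · rw [← hinv x]
                    simp only [PySem.Set.add]
                    split_ifs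
                    all_goals simp [PySem.Set.contains, List.mem_append, hx])
          · have hg : genStep kc rc (started, finished, []) (n, row) =
                (started, finished, []) := by
              rw [genStep_eq, if_neg h0, if_pos hs, if_pos hbeg]
            have hbs : bStep kc rc rtc qc (pvMapQ rc qc prr, finished, fst) row =
                (pvMapQ rc qc prr, finished, fst) := by
              rw [bStep_eq, if_neg h0, if_pos hdc, if_neg (hmB.trans_ne hbeg)]
            rw [hg, hbs]
            simpa using ih n.succ started finished prr fst hnd hinv

theorem merge_inv (resp qc : String) :
    ∀ (rs : List (List (String × String))) (mc : List String) (sel : PySem.Set String)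
      (d : PySem.Dict String String),
    mc = d.keys → (∀ x, PySem.Set.contains sel x = d.contains x) →
    (rs.foldl (aMergeStep qc) (mc, sel)).1 = (rs.foldl (pvQStep resp qc) d).keys ∧
    (∀ x, PySem.Set.contains (rs.foldl (aMergeStep qc) (mc, sel)).2 x =
      (rs.foldl (pvQStep resp qc) d).contains x) := by
  intro rs
  induction rs with
  | nil => intro mc sel d h1 h2; exact ⟨h1, h2⟩
  | cons row rest ih =>
      intro mc sel d h1 h2
      simp only [List.foldl_cons]
      by_cases hq : PySem.Str.strip ((pvRowGet row qc).getD "") = ""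
      · have ha : aMergeStep qc (mc, sel) row = (mc, sel) := by
          simp only [aMergeStep]; rw [if_pos (Or.inl hq)]
        have hb : pvQStep resp qc d row = d := by
          simp only [pvQStep]; rw [if_pos hq]
        rw [ha, hb]; exact ih mc sel d h1 h2
      · have hb : pvQStep resp qc d row =
            d.insert (PySem.Str.strip ((pvRowGet row qc).getD ""))
              ((pvRowGet row resp).getD "") := by
          simp only [pvQStep]; rw [if_neg hq]
        by_cases hc : d.contains (PySem.Str.strip ((pvRowGet row qc).getD "")) = true
        · have hsel : PySem.Set.contains sel (PySem.Str.strip ((pvRowGet row qc).getD "")) = true := by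
            rw [h2]; exact hc
          have ha : aMergeStep qc (mc, sel) row = (mc, sel) := by
            simp only [aMergeStep]; rw [if_pos (Or.inr hsel)]
          rw [ha, hb]
          apply ih
          · rw [h1, PySem.Dict.keys_insert_of_contains _ _ hc]
          · intro x
            rw [h2 x, PySem.Dict.contains_insert]
            by_cases hx : x = PySem.Str.strip ((pvRowGet row qc).getD "")
            · simp [hx, hc]
            · simp [hx]
        · have hsel : PySem.Set.contains sel (PySem.Str.strip ((pvRowGet row qc).getD "")) = false := by
            rw [h2]; simpa using hc
          have ha : aMergeStep qc (mc, sel) row =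
              (mc ++ [PySem.Str.strip ((pvRowGet row qc).getD "")],
               PySem.Set.add sel (PySem.Str.strip ((pvRowGet row qc).getD ""))) := by
            simp only [aMergeStep]
            rw [if_neg]
            rintro (h | h)
            · exact hq h
            · rw [hsel] at h; exact absurd h (by simp)
          rw [ha, hb]
          apply ih
          · rw [h1, PySem.Dict.keys_insert_of_not_contains _ _ (by simpa using hc)]
          · intro x
            rw [PySem.Dict.contains_insert]
            have hadd : PySem.Set.add sel (PySem.Str.strip ((pvRowGet row qc).getD "")) =
                sel ++ [PySem.Str.strip ((pvRowGet row qc).getD "")] := by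
              simp only [PySem.Set.add, hsel]
              simp
            rw [hadd]
            show List.contains (sel ++ [_]) x = _
            rw [List.contains_append,
              show List.contains sel x = d.contains x from h2 x, List.contains_cons]
            simp [Bool.or_comm]

theorem filt_getD (resp qc : String) (sel : PySem.Set String) (q : String)
    (hq : PySem.Set.contains sel q = true) :
    ∀ (rs : List (List (String × String))) (d1 d2 : PySem.Dict String String),
    d1.getD q "" = d2.getD q "" →
    (rs.foldl (aFiltStep resp qc sel) d1).getD q "" =
      (rs.foldl (pvQStep resp qc) d2).getD q "" := by
  intro rs
  induction rs with
  | nil => intro d1 d2 h; exact h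
  | cons row rest ih =>
      intro d1 d2 h
      simp only [List.foldl_cons]
      by_cases hq' : PySem.Str.strip ((pvRowGet row qc).getD "") = ""
      · have ha : aFiltStep resp qc sel d1 row = d1 := by simp [aFiltStep, hq']
        have hb : pvQStep resp qc d2 row = d2 := by simp [pvQStep, hq']
        rw [ha, hb]; exact ih d1 d2 h
      · have hb : pvQStep resp qc d2 row =
            d2.insert (PySem.Str.strip ((pvRowGet row qc).getD ""))
              ((pvRowGet row resp).getD "") := by simp [pvQStep, hq']
        by_cases hc : PySem.Set.contains sel (PySem.Str.strip ((pvRowGet row qc).getD "")) = true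
        · have ha : aFiltStep resp qc sel d1 row =
              d1.insert (PySem.Str.strip ((pvRowGet row qc).getD ""))
                ((pvRowGet row resp).getD "") := by
            simp only [aFiltStep]
            rw [if_neg]
            rintro (h | h)
            · exact h hc
            · exact hq' h
          rw [ha, hb]
          apply ih
          rw [PySem.Dict.getD_insert, PySem.Dict.getD_insert]
          by_cases hx : q = PySem.Str.strip ((pvRowGet row qc).getD "")
          · simp [hx]
          · simp [hx, h]
        · have ha : aFiltStep resp qc sel d1 row = d1 := by
            simp only [aFiltStep]
            rw [if_pos (Or.inl hc)]
          have hne : q ≠ PySem.Str.strip ((pvRowGet row qc).getD "") := by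
            intro hcontra; rw [hcontra] at hq; exact hc hq
          rw [ha, hb]
          apply ih
          rw [PySem.Dict.getD_insert, if_neg hne]
          exact h

theorem post_eq (resp qc : String) (F : PySem.Set String)
    (prr : PySem.Dict String (List (List (String × String)))) (first : Option String) :
    aPost resp qc (prr, first) = bPost (pvMapQ resp qc prr, F, first) := by
  cases first with
  | none =>
      simp only [aPost, bPost, pvMapQ]
      rw [List.foldl_map]
      rfl
  | some f =>
      have hrs : ((pvMapQ resp qc prr).get? f).getD (PySem.Dict.mk []) =
          pvQOf resp qc ((prr.get? f).getD []) := by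
        rw [get?_pvMapQ]; cases prr.get? f <;> rfl
      obtain ⟨hm, hs⟩ := merge_inv resp qc ((prr.get? f).getD []) [] PySem.Set.empty
        (PySem.Dict.mk []) rfl (fun x => rfl)
      have hmem : ∀ x ∈ (pvQOf resp qc ((prr.get? f).getD [])).keys,
          PySem.Set.contains (((prr.get? f).getD []).foldl (aMergeStep qc)
            ([], PySem.Set.empty)).2 x = true := by
        intro x hx
        rw [hs x]
        exact (PySem.Dict.contains_iff_mem_keys _ _).mpr hx
      have hm' : (((prr.get? f).getD []).foldl (aMergeStep qc) ([], PySem.Set.empty)).1 =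
          (pvQOf resp qc ((prr.get? f).getD [])).keys := hm
      have hrs' : ((({ items := prr.items.map (fun pr => (pr.1, pvQOf resp qc pr.2)) } :
            PySem.Dict String (PySem.Dict String String)).get? f).getD (PySem.Dict.mk [])) =
          pvQOf resp qc ((prr.get? f).getD []) := hrs
      simp only [aPost, bPost, pvMapQ]
      rw [List.foldl_map, hrs', hm']
      congr 1
      apply congrArg
      apply PySem.List.foldl_congr_mem
      intro m pr _
      congr 1
      apply congrArg
      apply PySem.List.foldl_congr_mem
      intro d x hx
      congr 1
      exact filt_getD resp qc _ x (hmem x hx) pr.2 (PySem.Dict.mk []) (PySem.Dict.mk []) rfl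

-- ===== VERDICT (by name: the statement is the Claim_ definition above) =====
theorem aggregate_windowed_response_questions_spec : Claim_equal_aggregate_windowed_response_questions := by
  intro rows key_column response_column response_type_column question_column _
  unfold Spec_aggregate_windowed_response_questions
  unfold aggregate_windowed_response_questions aggregate_windowed_response_questions_alt
  unfold iterWindowEvents
  have h0 : (PySem.Dict.mk [] : PySem.Dict String (PySem.Dict String String)) =
      pvMapQ response_column question_column (PySem.Dict.mk []) := rfl
  rw [h0, pvFuse key_column response_column response_type_column question_column rows 2
      PySem.Set.empty PySem.Set.empty (PySem.Dict.mk []) none List.nodup_nil (fun p => rfl)]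
  rw [← post_eq]
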